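-- pv_equiv track=rewrite | github.com/modu-ai/moai-adk | .moai/scripts/security/notion-security-manager.py | _calculate_security_status
-- ===== SOURCE A (Python) =====
-- from typing import Dict, List, Optional, Any
--
-- def _calculate_security_status(threats: List[Dict[str, Any]]) -> str:
--     """Calculate overall security status"""
--     if not threats:
--         return "SECURE"
--
--     high_severity_threats = [t for t in threats if t.get("severity") == "HIGH"]
--     if high_severity_threats:
--         return "CRITICAL"
--
--     medium_severity_threats = [t for t in threats if t.get("severity") == "MEDIUM"]
--     if medium_severity_threats:
--         return "WARNING"
--
--     return "MONITOR"
-- ===== SOURCE B (Python) =====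
-- _RANK = {"HIGH": 2, "MEDIUM": 1}
--
-- def _calculate_security_status(threats):
--     """Calculate overall security status"""
--     if not threats:
--         return "SECURE"
--     best = 0
--     for t in threats:
--         best = max(best, _RANK.get(t.get("severity"), 0))
--     return "CRITICAL" if best == 2 else "WARNING" if best == 1 else "MONITOR"
-- ===== Notes on version B (the rewrite author's own statement) =====
-- stated objective: simpler
-- what changed: Replaces the two filtered category lists and their truthiness tests with a single max-rank reduction (HIGH=2, MEDIUM=1, else 0) translated through a status table.
import Mathlib
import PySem

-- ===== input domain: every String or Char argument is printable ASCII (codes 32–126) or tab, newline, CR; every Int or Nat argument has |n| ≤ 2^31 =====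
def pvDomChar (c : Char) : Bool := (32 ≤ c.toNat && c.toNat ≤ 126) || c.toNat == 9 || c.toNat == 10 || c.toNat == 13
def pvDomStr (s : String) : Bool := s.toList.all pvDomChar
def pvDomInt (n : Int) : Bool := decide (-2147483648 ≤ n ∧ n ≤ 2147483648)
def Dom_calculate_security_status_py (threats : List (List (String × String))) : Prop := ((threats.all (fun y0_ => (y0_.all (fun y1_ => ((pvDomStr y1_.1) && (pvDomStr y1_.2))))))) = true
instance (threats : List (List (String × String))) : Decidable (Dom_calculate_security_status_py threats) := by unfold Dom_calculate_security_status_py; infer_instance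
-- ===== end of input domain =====

-- B: one max-rank reduction plus a scalar translation, instead of A's two filtered category lists; same O(n) cost (objective: simpler).
-- ===== PORT A =====
def calculate_security_status_py (threats : List (List (String × String))) : String :=
  if threats = [] then "SECURE"
  else
    let high_severity_threats := threats.filter (fun t => (PySem.Dict.mk t).get? "severity" == some "HIGH")
    if high_severity_threats ≠ [] then "CRITICAL"
    else
      let medium_severity_threats := threats.filter (fun t => (PySem.Dict.mk t).get? "severity" == some "MEDIUM")
      if medium_severity_threats ≠ [] then "WARNING"
      else "MONITOR"

-- ===== PORT B =====
def pvRankDict : PySem.Dict String Int := PySem.Dict.ofList [("HIGH", 2), ("MEDIUM", 1)]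

-- _RANK.get(t.get("severity"), 0): a missing "severity" key gives None, which is not a _RANK key, hence 0
def pvRank (t : List (String × String)) : Int :=
  match (PySem.Dict.mk t).get? "severity" with
  | some s => pvRankDict.getD s 0
  | none => 0

def calculate_security_status_py_alt (threats : List (List (String × String))) : String :=
  if threats = [] then "SECURE"
  else
    let best := threats.foldl (fun b t => max b (pvRank t)) 0
    if best = 2 then "CRITICAL" else if best = 1 then "WARNING" else "MONITOR"

-- ===== PRECONDITION & SPEC =====
def Spec_calculate_security_status_py (threats : List (List (String × String))) (out : String) : Prop := out = calculate_security_status_py_alt threats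
instance (threats : List (List (String × String))) (out : String) : Decidable (Spec_calculate_security_status_py threats out) := by unfold Spec_calculate_security_status_py; infer_instance

-- ===== CLAIM (what is proved, stated in full; the proofs are below) =====
def Claim_equal_calculate_security_status_py : Prop := ∀ (threats : List (List (String × String))), Dom_calculate_security_status_py threats → Spec_calculate_security_status_py threats (calculate_security_status_py threats)

-- ===== LEMMAS AND PROOFS =====

-- ===== VERDICT (by name: the statement is the Claim_ definition above) =====
lemma pvRank_eq (t : List (String × String)) :
    pvRank t = (if (PySem.Dict.mk t).get? "severity" == some "HIGH" then (2:Int)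
                else if (PySem.Dict.mk t).get? "severity" == some "MEDIUM" then 1 else 0) := by
  unfold pvRank
  have hd : pvRankDict = PySem.Dict.mk [("HIGH", 2), ("MEDIUM", 1)] := by decide
  rcases h : (PySem.Dict.mk t).get? "severity" with _ | s
  · simp
  · by_cases hH : s = "HIGH"
    · subst hH; simp [hd]; decide
    · by_cases hM : s = "MEDIUM"
      · subst hM; simp [hd]; decide
      · simp [hd, PySem.Dict.getD, hH, hM,
              Ne.symm hH, Ne.symm hM, PySem.Dict.get?]

-- the fold of max over ranks, started from a nonnegative accumulator
lemma pvFold_max_eq (threats : List (List (String × String))) (b : Int) (hb : 0 ≤ b) :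
    threats.foldl (fun b t => max b (pvRank t)) b =
      max b (if threats.any (fun t => (PySem.Dict.mk t).get? "severity" == some "HIGH") then 2
             else if threats.any (fun t => (PySem.Dict.mk t).get? "severity" == some "MEDIUM") then 1
             else 0) := by
  induction threats generalizing b with
  | nil => simp; omega
  | cons t ts ih =>
    have hb' : (0:Int) ≤ max b (pvRank t) := le_trans hb (le_max_left _ _)
    rw [List.foldl_cons, ih _ hb', pvRank_eq]
    simp only [List.any_cons]
    by_cases h1 : ((PySem.Dict.mk t).get? "severity" == some "HIGH") = true <;>
      by_cases h2 : ((PySem.Dict.mk t).get? "severity" == some "MEDIUM") = true <;>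
      by_cases h3 : (ts.any fun t => (PySem.Dict.mk t).get? "severity" == some "HIGH") = true <;>
      by_cases h4 : (ts.any fun t => (PySem.Dict.mk t).get? "severity" == some "MEDIUM") = true <;>
      simp [h1, h2, h3, h4, Int.max_def] <;> split_ifs <;> omega

theorem calculate_security_status_py_spec : Claim_equal_calculate_security_status_py := by
  intro threats _
  unfold Spec_calculate_security_status_py calculate_security_status_py calculate_security_status_py_alt
  by_cases hnil : threats = []
  · simp [hnil]
  · simp only [if_neg hnil, pvFold_max_eq threats 0 le_rfl]
    by_cases hH : ∃ x ∈ threats, (PySem.Dict.mk x).get? "severity" = some "HIGH" <;>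
      by_cases hM : ∃ x ∈ threats, (PySem.Dict.mk x).get? "severity" = some "MEDIUM" <;>
      simp [hH, hM, List.filter_eq_nil_iff, List.any_eq_true]
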